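-- pv_equiv track=rewrite | github.com/pypi-data/pypi-mirror-268 | packages/tidbytes/tidbytes-0.1.1.tar.gz/tidbytes-0.1.1/tidbytes/natural.py | group_bits_into_bytes
-- ===== SOURCE A (Python) =====
-- LogicalMemory = list[list[int]]
--
-- def group_bits_into_bytes(bits: list[int]) -> LogicalMemory:
--     "Collect flat list of bits into lists of lists of 8 bits (bytes)."
--     if not bits:
--         return bits
--     bytes_, byte = [], []
--     for i, bit in enumerate(bits):
--         if byte and i % 8 == 0:
--             bytes_.append(byte[:])
--             byte.clear()
--         byte.append(bit)
--     bytes_.append((byte + [None] * 8)[:8])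
--     return bytes_
-- ===== SOURCE B (Python) =====
-- def group_bits_into_bytes(bits: list[int]) -> list[list[int]]:
--     "Collect flat list of bits into lists of lists of 8 bits (bytes)."
--     out = []
--     i = 0
--     while i < len(bits):
--         out.append((bits[i:i + 8] + [None] * 8)[:8])
--         i += 8
--     return out
-- ===== Notes on version B (the rewrite author's own statement) =====
-- stated objective: simpler
-- what changed: Replaces the per-bit enumerate loop with its i%8 flush test and byte.clear()/byte[:] copying by a single chunked traversal that slices 8 bits at a time and pads each chunk uniformly.
import Mathlib
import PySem

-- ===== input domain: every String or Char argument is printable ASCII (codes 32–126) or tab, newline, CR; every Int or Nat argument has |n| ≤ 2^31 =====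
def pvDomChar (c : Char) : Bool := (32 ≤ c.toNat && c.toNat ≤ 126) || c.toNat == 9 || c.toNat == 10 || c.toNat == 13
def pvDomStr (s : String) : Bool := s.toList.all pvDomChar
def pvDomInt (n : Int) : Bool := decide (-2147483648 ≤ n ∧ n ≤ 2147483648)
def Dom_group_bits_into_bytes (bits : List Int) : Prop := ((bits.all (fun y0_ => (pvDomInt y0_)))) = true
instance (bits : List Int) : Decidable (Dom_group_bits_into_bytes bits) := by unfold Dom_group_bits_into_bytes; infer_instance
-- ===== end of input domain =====

-- B replaces A's per-bit accumulator loop (with its i % 8 flush test and list copying)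
-- by a simpler chunked traversal that slices 8 bits at a time; same O(n) cost.


-- ===== PORT A =====
-- loop body of A: state is (bytes_, byte); flush (appending a copy of byte, here
-- mapped to `some` per the type convention) when byte is nonempty and i % 8 == 0
def pvStepA (st : List (List (Option Int)) × List Int) (p : Int × Int) :
    List (List (Option Int)) × List Int :=
  if st.2 ≠ [] ∧ PySem.Int.mod p.1 8 = 0 then
    (st.1 ++ [st.2.map some], [p.2])
  else
    (st.1, st.2 ++ [p.2])

def group_bits_into_bytes (bits : List Int) : List (List (Option Int)) :=
  if bits = [] then [] else
    let st := (PySem.List.enumerate bits 0).foldl pvStepA ([], [])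
    st.1 ++ [(st.2.map some ++ List.replicate 8 none).take 8]

-- ===== PORT B =====
-- while i < len(bits): out.append((bits[i:i+8] + [None]*8)[:8]); i += 8
def pvAltLoop (bits : List Int) (out : List (List (Option Int))) (i : Int) :
    List (List (Option Int)) :=
  if h : i < (bits.length : Int) then
    pvAltLoop bits
      (out ++ [((PySem.List.slice bits (some i) (some (i + 8))).map some ++ List.replicate 8 none).take 8])
      (i + 8)
  else out
termination_by ((bits.length : Int) - i).toNat
decreasing_by omega

def group_bits_into_bytes_alt (bits : List Int) : List (List (Option Int)) :=
  pvAltLoop bits [] 0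

-- ===== PRECONDITION & SPEC =====
def Spec_group_bits_into_bytes (bits : List Int) (out : List (List (Option Int))) : Prop := out = group_bits_into_bytes_alt bits
instance (bits : List Int) (out : List (List (Option Int))) : Decidable (Spec_group_bits_into_bytes bits out) := by unfold Spec_group_bits_into_bytes; infer_instance

-- ===== CLAIM (what is proved, stated in full; the proofs are below) =====
def Claim_equal_group_bits_into_bytes : Prop := ∀ (bits : List Int), Dom_group_bits_into_bytes bits → Spec_group_bits_into_bytes bits (group_bits_into_bytes bits)

-- ===== LEMMAS AND PROOFS =====

-- proof-side normal form of B's loop: recursion on the remaining suffix of the list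
def pvChunk (out : List (List (Option Int))) (rest : List Int) : List (List (Option Int)) :=
  if rest = [] then out
  else pvChunk (out ++ [((rest.take 8).map some ++ List.replicate 8 none).take 8]) (rest.drop 8)
termination_by rest.length
decreasing_by
  cases rest with
  | nil => simp_all
  | cons a t => simp

-- B's index loop computes pvChunk on the suffix it has not yet consumed
theorem pvAlt_eq_chunk (bits : List Int) : ∀ (m i : Nat), bits.length - i ≤ m →
    ∀ (out : List (List (Option Int))),
    pvAltLoop bits out ((i : Nat) : Int) = pvChunk out (bits.drop i) := by
  intro m
  induction m with
  | zero =>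
    intro i hi out
    have hge : bits.length ≤ i := by omega
    rw [pvAltLoop.eq_def, dif_neg (by push_cast; omega)]
    rw [pvChunk.eq_def, if_pos (List.drop_eq_nil_of_le hge)]
  | succ m ih =>
    intro i hi out
    by_cases hlt : i < bits.length
    · rw [pvAltLoop.eq_def, dif_pos (by push_cast; omega)]
      have hslice : PySem.List.slice bits (some ((i : Nat) : Int)) (some (((i : Nat) : Int) + 8)) =
          (bits.drop i).take 8 := by
        rw [PySem.List.slice_toNat bits (by omega) (by omega)]
        norm_num
        omega
      have hcast : (((i : Nat) : Int) + 8) = (((i + 8 : Nat)) : Int) := by push_cast; ring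
      rw [hslice, hcast, ih (i + 8) (by omega) _]
      rw [pvChunk.eq_def (rest := bits.drop i),
        if_neg (by intro hnil; have := List.length_drop (l := bits) (i := i); rw [hnil] at this; simp at this; omega)]
      rw [List.drop_drop]
    · have hge : bits.length ≤ i := by omega
      rw [pvAltLoop.eq_def, dif_neg (by push_cast; omega)]
      rw [pvChunk.eq_def, if_pos (List.drop_eq_nil_of_le hge)]

-- A's loop never flushes across a run of indices not divisible by 8: it just appends.
theorem pv_fill (l : List Int) : ∀ (i : Nat)
    (bytes : List (List (Option Int))) (byte : List Int),
    (∀ j, j < l.length → (i + j) % 8 ≠ 0) →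
    (PySem.List.enumerate l (i : Int)).foldl pvStepA (bytes, byte) = (bytes, byte ++ l) := by
  induction l with
  | nil => intro i bytes byte _; simp [PySem.List.enumerate_nil]
  | cons a t ih =>
    intro i bytes byte h
    rw [PySem.List.enumerate_cons]
    have h0 : (i : Nat) % 8 ≠ 0 := by
      have := h 0 (by simp); simpa using this
    have hmod : PySem.Int.mod (i : Int) 8 ≠ 0 := by
      rw [PySem.Int.mod_eq_emod_of_pos (by omega)]
      omega
    have hstep : pvStepA (bytes, byte) ((i : Int), a) = (bytes, byte ++ [a]) := by
      simp [pvStepA]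
      intro _
      omega
    have hcast : ((i : Int) + 1) = ((i + 1 : Nat) : Int) := by push_cast; ring
    rw [List.foldl_cons, hstep, hcast, ih (i + 1) bytes (byte ++ [a])
      (by intro j hj; have := h (j + 1) (by simpa using Nat.succ_lt_succ hj); omega)]
    simp

-- starting a fresh byte at a block boundary, a block of ≤ 8 bits is just accumulated
theorem pv_block (l : List Int) (k : Nat) (bytes : List (List (Option Int)))
    (hne : l ≠ []) (hlen : l.length ≤ 8) :
    (PySem.List.enumerate l ((8 * k : Nat) : Int)).foldl pvStepA (bytes, []) = (bytes, l) := by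
  cases l with
  | nil => exact absurd rfl hne
  | cons a t =>
    rw [PySem.List.enumerate_cons]
    have hstep : pvStepA (bytes, []) (((8 * k : Nat) : Int), a) = (bytes, [a]) := by
      simp [pvStepA]
    have hcast : (((8 * k : Nat) : Int) + 1) = ((8 * k + 1 : Nat) : Int) := by push_cast; ring
    rw [List.foldl_cons, hstep, hcast, pv_fill t (8 * k + 1) bytes [a]
      (by intro j hj; simp at hlen; omega)]
    simp

-- a pending full byte may be flushed eagerly before the next (boundary-indexed) element
theorem pv_flush (b : Int) (t : List Int) (m : Nat) (hm : m % 8 = 0)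
    (bytes : List (List (Option Int))) (byte : List Int) (hb : byte ≠ []) :
    (PySem.List.enumerate (b :: t) ((m : Nat) : Int)).foldl pvStepA (bytes, byte) =
    (PySem.List.enumerate (b :: t) ((m : Nat) : Int)).foldl pvStepA (bytes ++ [byte.map some], []) := by
  rw [PySem.List.enumerate_cons, List.foldl_cons, List.foldl_cons]
  have h1 : pvStepA (bytes, byte) (((m : Nat) : Int), b) = (bytes ++ [byte.map some], [b]) := by
    simp [pvStepA, hb]
    omega
  have h2 : pvStepA (bytes ++ [byte.map some], []) (((m : Nat) : Int), b) =
      (bytes ++ [byte.map some], [b]) := by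
    simp [pvStepA]
  rw [h1, h2]

-- main invariant: from a block boundary with an empty pending byte, A's loop + final
-- padding computes exactly B's chunking
theorem pv_main : ∀ (n : Nat) (l : List Int), l.length ≤ n → l ≠ [] →
    ∀ (k : Nat) (bytes : List (List (Option Int))),
    (let st := (PySem.List.enumerate l ((8 * k : Nat) : Int)).foldl pvStepA (bytes, [])
     st.1 ++ [(st.2.map some ++ List.replicate 8 none).take 8]) = pvChunk bytes l := by
  intro n
  induction n with
  | zero => intro l hl hne; cases l with
    | nil => exact absurd rfl hne
    | cons a t => simp at hl
  | succ n ih =>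
    intro l hl hne k bytes
    by_cases h8 : l.length ≤ 8
    · rw [pv_block l k bytes hne h8]
      rw [pvChunk.eq_def, if_neg hne]
      have hdnil : l.drop 8 = [] := List.drop_eq_nil_of_le h8
      have htake : l.take 8 = l := List.take_of_length_le h8
      rw [hdnil, htake, pvChunk.eq_def]
      simp
    · -- more than 8 bits: split off the first block of 8
      rw [not_le] at h8
      have hsplit : l = l.take 8 ++ l.drop 8 := (List.take_append_drop 8 l).symm
      have hlen8 : (l.take 8).length = 8 := by simp; omega
      have hdne : l.drop 8 ≠ [] := by
        intro hd
        have := List.length_drop (l := l) (i := 8)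
        rw [hd] at this; simp at this; omega
      obtain ⟨b, t, hbt⟩ := List.exists_cons_of_ne_nil hdne
      have henum : PySem.List.enumerate l ((8 * k : Nat) : Int) =
          PySem.List.enumerate (l.take 8) ((8 * k : Nat) : Int) ++
          PySem.List.enumerate (l.drop 8) ((8 * (k + 1) : Nat) : Int) := by
        conv_lhs => rw [hsplit]
        rw [PySem.List.enumerate_append]
        congr 1
        congr 1
        rw [hlen8]; push_cast; ring
      rw [henum, List.foldl_append,
        pv_block (l.take 8) k bytes (by intro h; rw [h] at hlen8; simp at hlen8) (by omega)]
      rw [hbt, pv_flush b t (8 * (k + 1)) (by omega) bytes (l.take 8)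
        (by intro h; rw [h] at hlen8; simp at hlen8), ← hbt]
      have := ih (l.drop 8) (by simp; omega) hdne (k + 1) (bytes ++ [(l.take 8).map some])
      rw [this]
      conv_rhs => rw [pvChunk.eq_def]
      rw [if_neg hne]
      have hpad : (((l.take 8).map some : List (Option Int)) ++ List.replicate 8 none).take 8 =
          (l.take 8).map some := by
        rw [List.take_append_of_le_length (by simp; omega)]
        exact List.take_of_length_le (by simp)
      rw [hpad]

-- ===== VERDICT (by name: the statement is the Claim_ definition above) =====
theorem group_bits_into_bytes_spec : Claim_equal_group_bits_into_bytes := by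
  intro bits _
  unfold Spec_group_bits_into_bytes group_bits_into_bytes group_bits_into_bytes_alt
  have halt : pvAltLoop bits [] 0 = pvChunk [] bits := by
    have := pvAlt_eq_chunk bits bits.length 0 (by omega) []
    simpa using this
  rw [halt]
  by_cases hb : bits = []
  · subst hb; rw [pvChunk.eq_def]; simp
  · rw [if_neg hb]
    have := pv_main bits.length bits le_rfl hb 0 []
    simpa using this
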